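-- pv_equiv track=rewrite | github.com/stewvsshark/algorithms-practice | Arrays/contiguous-subarrays.py | my_implementation
-- ===== SOURCE A (Python) =====
-- def my_implementation(arr):
--     array_length = len(arr)
--     result = [1] * array_length
--
--     for i, element in enumerate(arr):
--         sub_arrays = 0
--         for j in range(i+1, array_length):
--             if arr[i] > arr[j]:
--                 sub_arrays += 1
--             else:
--                 break
--         for k in range(i-1, -1, -1):
--             if arr[i] > arr[k]:
--                 sub_arrays += 1
--             else:
--                 break
--
--         result[i] += sub_arrays
--
--     return result
-- ===== SOURCE B (Python) =====
-- def my_implementation(arr):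
--     n = len(arr)
--     left = []
--     stack = []
--     for i in range(n):
--         while stack and arr[stack[-1]] < arr[i]:
--             stack.pop()
--         left.append(i - (stack[-1] if stack else -1) - 1)
--         stack.append(i)
--     right = [0] * n
--     stack = []
--     for i in range(n - 1, -1, -1):
--         while stack and arr[stack[-1]] < arr[i]:
--             stack.pop()
--         right[i] = (stack[-1] if stack else n) - i - 1
--         stack.append(i)
--     return [1 + l + r for l, r in zip(left, right)]
-- ===== Notes on version B (the rewrite author's own statement) =====
-- stated objective: faster
-- what changed: Replaced the per-element left/right linear scans with two monotonic-stack passes that find the nearest greater-or-equal neighbour on each side in amortized O(1) per element.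
import Mathlib
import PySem

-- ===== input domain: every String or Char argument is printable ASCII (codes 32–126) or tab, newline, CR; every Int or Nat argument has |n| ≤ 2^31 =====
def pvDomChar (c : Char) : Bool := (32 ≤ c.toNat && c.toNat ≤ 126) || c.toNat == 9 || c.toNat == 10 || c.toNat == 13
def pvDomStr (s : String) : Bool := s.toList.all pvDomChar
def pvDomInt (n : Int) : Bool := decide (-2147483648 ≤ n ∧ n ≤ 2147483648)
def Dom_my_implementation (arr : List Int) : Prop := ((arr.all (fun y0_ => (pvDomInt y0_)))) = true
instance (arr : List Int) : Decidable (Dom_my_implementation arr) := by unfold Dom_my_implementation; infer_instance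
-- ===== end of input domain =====

-- B replaces A's per-element left/right linear scans by two monotonic-stack passes; proved to return the same list.

-- ===== PORT A =====
-- inner loop `for j in range(i+1, n): if arr[i] > arr[j]: sub += 1 else: break`
def aGoR (a : List Int) (x : Int) (n : Nat) (j : Nat) : Int :=
  if _h : j < n then (if x > a.getD j 0 then 1 + aGoR a x n (j + 1) else 0) else 0
termination_by n - j
decreasing_by omega

-- inner loop `for k in range(i-1, -1, -1): if arr[i] > arr[k]: sub += 1 else: break`
-- (argument j means current index j-1; j = 0 means the loop is exhausted)
def aGoL (a : List Int) (x : Int) : Nat → Int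
  | 0 => 0
  | j + 1 => if x > a.getD j 0 then 1 + aGoL a x j else 0

def my_implementation (arr : List Int) : List Int :=
  (List.range arr.length).map (fun i =>
    1 + (aGoR arr (arr.getD i 0) arr.length (i + 1) + aGoL arr (arr.getD i 0) i))

-- ===== PORT B =====
-- `while stack and arr[stack[-1]] < arr[i]: stack.pop()` (stack top = list head)
def popWhile (a : List Int) (x : Int) : List Nat → List Nat
  | [] => []
  | t :: s => if a.getD t 0 < x then popWhile a x s else t :: s

-- one iteration of the first (left) pass: state = (left values so far, reversed; stack)
def leftStep (a : List Int) (st : List Int × List Nat) (i : Nat) : List Int × List Nat :=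
  let s := popWhile a (a.getD i 0) st.2
  (((i : Int) - (if s = [] then -1 else (s.headD 0 : Int)) - 1) :: st.1, i :: s)

-- one iteration of the second (right) pass over descending i: state = (right values so far; stack)
def rightStep (a : List Int) (n : Nat) (st : List Int × List Nat) (i : Nat) : List Int × List Nat :=
  let s := popWhile a (a.getD i 0) st.2
  (((if s = [] then (n : Int) else (s.headD 0 : Int)) - (i : Int) - 1) :: st.1, i :: s)

def my_implementation_alt (arr : List Int) : List Int :=
  List.zipWith (fun l r => 1 + l + r)
    (((List.range arr.length).foldl (leftStep arr) ([], [])).1.reverse)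
    (((List.range arr.length).reverse.foldl (rightStep arr arr.length) ([], [])).1)

-- ===== PRECONDITION & SPEC =====
def Spec_my_implementation (arr : List Int) (out : List Int) : Prop := out = my_implementation_alt arr
instance (arr : List Int) (out : List Int) : Decidable (Spec_my_implementation arr out) := by unfold Spec_my_implementation; infer_instance

-- ===== CLAIM (what is proved, stated in full; the proofs are below) =====
def Claim_equal_my_implementation : Prop := ∀ (arr : List Int), Dom_my_implementation arr → Spec_my_implementation arr (my_implementation arr)

-- ===== LEMMAS AND PROOFS =====

-- number of consecutive indices k = j-1, j-2, … with a[k] < x (the left count at i = j with x = a[j])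
def cntL (a : List Int) (x : Int) : Nat → Nat
  | 0 => 0
  | j + 1 => if a.getD j 0 < x then cntL a x j + 1 else 0

-- number of consecutive indices k = j, j+1, … (< n) with a[k] < x (the right count at i with j = i+1)
def cntR (a : List Int) (x : Int) (n : Nat) (j : Nat) : Nat :=
  if _h : j < n then (if a.getD j 0 < x then cntR a x n (j + 1) + 1 else 0) else 0
termination_by n - j
decreasing_by omega

-- the left-pass stack content before processing index m (head = top)
def chainL (a : List Int) : Nat → List Nat
  | 0 => []
  | j + 1 => j :: chainL a (j - cntL a (a.getD j 0) j)
decreasing_by omega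

-- the right-pass stack content before processing index m-1 (head = top); n = length
def chainR (a : List Int) (n : Nat) (m : Nat) : List Nat :=
  if _h : m < n then m :: chainR a n (m + 1 + cntR a (a.getD m 0) n (m + 1)) else []
termination_by n - m
decreasing_by omega

theorem cntL_le (a : List Int) (x : Int) : ∀ j, cntL a x j ≤ j := by
  intro j; induction j with
  | zero => simp [cntL]
  | succ j ih => rw [cntL]; split_ifs <;> omega

theorem cntL_mem (a : List Int) (x : Int) :
    ∀ j k, j - cntL a x j ≤ k → k < j → a.getD k 0 < x := by
  intro j; induction j with
  | zero => omega
  | succ j ih =>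
    intro k h1 h2
    rw [cntL] at h1
    by_cases hx : a.getD j 0 < x
    · rw [if_pos hx] at h1
      by_cases hk : k = j
      · rwa [hk]
      · exact ih k (by omega) (by omega)
    · rw [if_neg hx] at h1; omega

theorem cntL_skip (a : List Int) (x : Int) :
    ∀ j p, p ≤ j → (∀ k, p ≤ k → k < j → a.getD k 0 < x) →
      cntL a x j = (j - p) + cntL a x p := by
  intro j; induction j with
  | zero =>
    intro p hp _
    have : p = 0 := by omega
    subst this; simp
  | succ j ih =>
    intro p hp hall
    rcases Nat.lt_or_ge p (j + 1) with h | h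
    · have hx : a.getD j 0 < x := hall j (by omega) (by omega)
      rw [cntL, if_pos hx]
      rw [ih p (by omega) (fun k hk1 hk2 => hall k hk1 (by omega))]
      omega
    · have : p = j + 1 := by omega
      subst this; omega

theorem cntL_jump (a : List Int) (x : Int) (j : Nat) (h : a.getD j 0 < x) :
    cntL a x j = cntL a (a.getD j 0) j + cntL a x (j - cntL a (a.getD j 0) j) := by
  have hc := cntL_le a (a.getD j 0) j
  have hs := cntL_skip a x j (j - cntL a (a.getD j 0) j) (by omega)
    (fun k hk1 hk2 => lt_trans (cntL_mem a (a.getD j 0) j k hk1 hk2) h)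
  rw [hs]; omega

theorem popWhile_chainL (a : List Int) (x : Int) :
    ∀ m, popWhile a x (chainL a m) = chainL a (m - cntL a x m) := by
  intro m
  induction m using Nat.strong_induction_on with
  | _ m ih =>
    match m with
    | 0 => simp [chainL, cntL, popWhile]
    | j + 1 =>
      rw [chainL, popWhile]
      by_cases h : a.getD j 0 < x
      · rw [if_pos h]
        rw [ih (j - cntL a (a.getD j 0) j) (by omega)]
        congr 1
        have h1 := cntL_le a (a.getD j 0) j
        have h2 := cntL_le a x (j - cntL a (a.getD j 0) j)
        have hj := cntL_jump a x j h
        have hx : cntL a x (j + 1) = cntL a x j + 1 := by rw [cntL, if_pos h]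
        omega
      · rw [if_neg h]
        have hx : cntL a x (j + 1) = 0 := by rw [cntL, if_neg h]
        rw [hx, Nat.sub_zero, chainL]

theorem leftFold (a : List Int) :
    ∀ i, (List.range i).foldl (leftStep a) ([], []) =
      (((List.range i).map (fun j => (cntL a (a.getD j 0) j : Int))).reverse, chainL a i) := by
  intro i; induction i with
  | zero => simp [chainL]
  | succ i ih =>
    rw [List.range_succ, List.foldl_append, ih]
    simp only [List.foldl_cons, List.foldl_nil, List.map_append, List.map_cons, List.map_nil,
      List.reverse_append, List.reverse_cons, List.reverse_nil, List.nil_append, List.cons_append]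
    simp only [leftStep, popWhile_chainL]
    have hle := cntL_le a (a.getD i 0) i
    have hv : ((i : Int) - (if chainL a (i - cntL a (a.getD i 0) i) = [] then -1
        else ((chainL a (i - cntL a (a.getD i 0) i)).headD 0 : Int)) - 1) =
        (cntL a (a.getD i 0) i : Int) := by
      cases hm : i - cntL a (a.getD i 0) i with
      | zero => rw [chainL, if_pos rfl]; omega
      | succ j =>
        rw [chainL, if_neg (by simp), List.headD_cons]
        omega
    rw [hv]
    simp only [Prod.mk.injEq, true_and]
    conv_rhs => rw [chainL]

theorem cntR_le (a : List Int) (x : Int) (n : Nat) : ∀ j, cntR a x n j ≤ n - j := by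
  suffices h : ∀ f j, n - j ≤ f → cntR a x n j ≤ n - j from fun j => h (n - j) j le_rfl
  intro f; induction f with
  | zero =>
    intro j h
    have hm : ¬ j < n := by omega
    rw [cntR, dif_neg hm]
    omega
  | succ f ih =>
    intro j h
    rw [cntR]
    split_ifs with h1 h2
    · have := ih (j + 1) (by omega); omega
    · omega
    · omega

theorem cntR_mem (a : List Int) (x : Int) (n : Nat) :
    ∀ j k, j ≤ k → k < j + cntR a x n j → a.getD k 0 < x := by
  suffices h : ∀ f j, n - j ≤ f → ∀ k, j ≤ k → k < j + cntR a x n j → a.getD k 0 < x from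
    fun j => h (n - j) j le_rfl
  intro f; induction f with
  | zero =>
    intro j h k hk1 hk2
    have hm : ¬ j < n := by omega
    rw [cntR, dif_neg hm] at hk2
    omega
  | succ f ih =>
    intro j h k hk1 hk2
    rw [cntR] at hk2
    split_ifs at hk2 with h1 h2
    · by_cases hk : k = j
      · rwa [hk]
      · exact ih (j + 1) (by omega) k (by omega) (by omega)
    · omega
    · omega

theorem cntR_skip (a : List Int) (x : Int) (n : Nat) :
    ∀ j p, p ≤ j → j ≤ n → (∀ k, p ≤ k → k < j → a.getD k 0 < x) →
      cntR a x n p = (j - p) + cntR a x n j := by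
  suffices h : ∀ f j p, j - p ≤ f → p ≤ j → j ≤ n → (∀ k, p ≤ k → k < j → a.getD k 0 < x) →
      cntR a x n p = (j - p) + cntR a x n j from
    fun j p => h (j - p) j p le_rfl
  intro f; induction f with
  | zero =>
    intro j p h hp _ _
    have : p = j := by omega
    subst this; omega
  | succ f ih =>
    intro j p h hp hn hall
    rcases Nat.lt_or_ge p j with h1 | h1
    · have hx : a.getD p 0 < x := hall p le_rfl h1
      have hpn : p < n := by omega
      rw [cntR, dif_pos hpn, if_pos hx]
      rw [ih j (p + 1) (by omega) (by omega) hn (fun k hk1 hk2 => hall k (by omega) hk2)]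
      omega
    · have : p = j := by omega
      subst this; omega

theorem popWhile_chainR (a : List Int) (x : Int) (n : Nat) :
    ∀ m, popWhile a x (chainR a n m) = chainR a n (m + cntR a x n m) := by
  suffices h : ∀ f m, n - m ≤ f → popWhile a x (chainR a n m) = chainR a n (m + cntR a x n m) from
    fun m => h (n - m) m le_rfl
  intro f; induction f with
  | zero =>
    intro m h
    have hm : ¬ m < n := by omega
    have hx2 : cntR a x n m = 0 := by rw [cntR, dif_neg hm]
    rw [hx2, Nat.add_zero, chainR, dif_neg hm, popWhile]
  | succ f ih =>
    intro m h
    by_cases hm : m < n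
    · rw [chainR, dif_pos hm, popWhile]
      by_cases hx : a.getD m 0 < x
      · rw [if_pos hx]
        have hc := cntR_le a (a.getD m 0) n (m + 1)
        rw [ih (m + 1 + cntR a (a.getD m 0) n (m + 1)) (by omega)]
        congr 1
        have hq := cntR_skip a x n (m + 1 + cntR a (a.getD m 0) n (m + 1)) (m + 1)
          (by omega) (by omega)
          (fun k hk1 hk2 => lt_trans (cntR_mem a (a.getD m 0) n (m + 1) k hk1 (by omega)) hx)
        have hx2 : cntR a x n m = cntR a x n (m + 1) + 1 := by
          rw [cntR, dif_pos hm, if_pos hx]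
        have hc2 := cntR_le a x n (m + 1 + cntR a (a.getD m 0) n (m + 1))
        omega
      · rw [if_neg hx]
        have hx2 : cntR a x n m = 0 := by rw [cntR, dif_pos hm, if_neg hx]
        have hmm : m + cntR a x n m = m := by omega
        rw [hmm]
        conv_rhs => rw [chainR, dif_pos hm]
    · have hx2 : cntR a x n m = 0 := by rw [cntR, dif_neg hm]
      rw [hx2, Nat.add_zero, chainR, dif_neg hm, popWhile]

theorem chainR_n (a : List Int) (n : Nat) : chainR a n n = [] := by
  rw [chainR]; simp

theorem rightFold (a : List Int) (n : Nat) :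
    ∀ i, i ≤ n → ∀ acc : List Int,
      (List.range i).reverse.foldl (rightStep a n) (acc, chainR a n i) =
        ((List.range i).map (fun j => (cntR a (a.getD j 0) n (j + 1) : Int)) ++ acc, chainR a n 0) := by
  intro i; induction i with
  | zero => intro _ acc; simp
  | succ i ih =>
    intro hin acc
    have hi : i < n := by omega
    rw [List.range_succ, List.reverse_append]
    simp only [List.reverse_cons, List.reverse_nil, List.nil_append, List.cons_append,
      List.foldl_cons]
    have hstep : rightStep a n (acc, chainR a n (i + 1)) i =
        ((cntR a (a.getD i 0) n (i + 1) : Int) :: acc, chainR a n i) := by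
      simp only [rightStep, popWhile_chainR]
      have hc := cntR_le a (a.getD i 0) n (i + 1)
      have hv : ((if chainR a n (i + 1 + cntR a (a.getD i 0) n (i + 1)) = [] then (n : Int)
          else ((chainR a n (i + 1 + cntR a (a.getD i 0) n (i + 1))).headD 0 : Int)) -
            (i : Int) - 1) = (cntR a (a.getD i 0) n (i + 1) : Int) := by
        by_cases hq : i + 1 + cntR a (a.getD i 0) n (i + 1) < n
        · rw [chainR, dif_pos hq, if_neg (by simp), List.headD_cons]
          omega
        · rw [chainR, dif_neg hq, if_pos rfl]
          omega
      rw [hv]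
      simp only [Prod.mk.injEq, true_and]
      conv_rhs => rw [chainR, dif_pos hi]
    rw [hstep, ih (by omega)]
    simp [List.append_assoc]

theorem rightFold_top (a : List Int) (n : Nat) :
    ((List.range n).reverse.foldl (rightStep a n) ([], [])).1 =
      (List.range n).map (fun j => (cntR a (a.getD j 0) n (j + 1) : Int)) := by
  have h := rightFold a n n le_rfl []
  rw [chainR_n] at h
  rw [h]
  simp

theorem aGoL_eq (a : List Int) (x : Int) : ∀ j, aGoL a x j = (cntL a x j : Int) := by
  intro j; induction j with
  | zero => simp [aGoL, cntL]
  | succ j ih =>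
    rw [aGoL, cntL]
    by_cases h : a.getD j 0 < x
    · rw [if_pos h, if_pos h, ih]; push_cast; ring
    · rw [if_neg h, if_neg h]; simp

theorem aGoR_eq (a : List Int) (x : Int) (n : Nat) : ∀ j, aGoR a x n j = (cntR a x n j : Int) := by
  suffices h : ∀ f j, n - j ≤ f → aGoR a x n j = (cntR a x n j : Int) from
    fun j => h (n - j) j le_rfl
  intro f; induction f with
  | zero =>
    intro j h
    have hm : ¬ j < n := by omega
    rw [aGoR, cntR, dif_neg hm, dif_neg hm]; simp
  | succ f ih =>
    intro j h
    rw [aGoR, cntR]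
    by_cases hm : j < n
    · rw [dif_pos hm, dif_pos hm]
      by_cases hx : a.getD j 0 < x
      · rw [if_pos hx, if_pos hx, ih (j + 1) (by omega)]; push_cast; ring
      · rw [if_neg hx, if_neg hx]; simp
    · rw [dif_neg hm, dif_neg hm]; simp

theorem zipWith_map_map {α β γ δ : Type} (f : β → γ → δ) (g : α → β) (h : α → γ) :
    ∀ l : List α, List.zipWith f (l.map g) (l.map h) = l.map (fun x => f (g x) (h x))
  | [] => rfl
  | x :: l => by
    simp only [List.map_cons, List.zipWith_cons_cons, zipWith_map_map f g h l]

-- ===== VERDICT (by name: the statement is the Claim_ definition above) =====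
theorem my_implementation_spec : Claim_equal_my_implementation := by
  unfold Claim_equal_my_implementation
  intro arr _
  unfold Spec_my_implementation my_implementation my_implementation_alt
  rw [rightFold_top, leftFold]
  simp only [List.reverse_reverse]
  rw [zipWith_map_map]
  refine List.map_congr_left (fun i _ => ?_)
  rw [aGoL_eq, aGoR_eq]
  ring
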